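-- pv_equiv track=rewrite | github.com/ColemanDuPlessie/posetrack_pose_prediction | ParsePosetrackJSON.py | _split_video_on_empty_frame
-- ===== SOURCE A (Python) =====
-- def _split_video_on_empty_frame(video):
--     if len(video) == 0: return []
--     for idx, frame in enumerate(video):
--         if all(item == None for item in frame[0].values()):
--             if idx == 0: return _split_video_on_empty_frame(video[1:])
--             elif idx == len(video) - 1: return [video[:idx]]
--             else: return _split_video_on_empty_frame(video[:idx]) + _split_video_on_empty_frame(video[idx+1:])
--     return [video]
-- ===== SOURCE B (Python) =====
-- def _split_video_on_empty_frame(video):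
--     runs = []
--     current = []
--     for frame in video:
--         if all(item == None for item in frame[0].values()):
--             if current:
--                 runs.append(current)
--             current = []
--         else:
--             current.append(frame)
--     if current:
--         runs.append(current)
--     return runs
-- ===== Notes on version B (the rewrite author's own statement) =====
-- stated objective: simpler
-- what changed: Replaced A's recursive split-at-the-first-empty-frame (which slices the list and recurses on the pieces) by a single left-to-right pass that accumulates the current run and flushes it at each empty frame and at the end.
-- outside the precondition, e.g. on _split_video_on_empty_frame([[], [{'a': 1}]]): A raises IndexError, B raises IndexError
import Mathlib
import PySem

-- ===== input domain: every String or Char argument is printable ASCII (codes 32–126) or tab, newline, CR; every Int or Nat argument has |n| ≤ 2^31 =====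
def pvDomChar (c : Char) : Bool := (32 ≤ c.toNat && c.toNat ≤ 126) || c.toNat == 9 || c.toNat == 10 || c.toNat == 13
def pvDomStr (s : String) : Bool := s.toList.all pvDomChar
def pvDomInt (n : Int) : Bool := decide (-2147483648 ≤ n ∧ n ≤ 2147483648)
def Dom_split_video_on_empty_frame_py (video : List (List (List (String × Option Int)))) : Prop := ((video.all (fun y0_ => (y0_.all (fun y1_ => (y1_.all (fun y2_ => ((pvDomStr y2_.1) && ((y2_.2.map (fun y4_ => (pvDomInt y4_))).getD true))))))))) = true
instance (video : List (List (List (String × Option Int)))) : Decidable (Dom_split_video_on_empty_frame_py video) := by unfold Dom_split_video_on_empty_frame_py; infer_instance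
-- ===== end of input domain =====

-- B replaces A's recursive split-at-first-empty-frame (with repeated slicing) by a single
-- left-to-right pass with a current-run accumulator; objective: simpler (one pass, no slicing).

-- ===== PORT A =====
-- `all(item == None for item in frame[0].values())`; frame[0] raises IndexError on an empty
-- frame (excluded by Pre_ below), the `none` branch value is arbitrary there.
def pvIsEmptyFrameA (f : List (List (String × Option Int))) : Bool :=
  match PySem.List.pyGet? f 0 with
  | some d => d.all (fun p => p.2 == (none : Option Int))
  | none => true

-- the `for idx, frame in enumerate(video): if all(...)` loop: index of the first empty frame
def pvFindEmptyA (l : List (List (List (String × Option Int)))) : Option Nat :=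
  match l with
  | [] => none
  | f :: rest => if pvIsEmptyFrameA f then some 0 else (pvFindEmptyA rest).map (· + 1)

theorem pvFindEmptyA_lt {l : List (List (List (String × Option Int)))} {i : Nat}
    (h : pvFindEmptyA l = some i) : i < l.length := by
  induction l generalizing i with
  | nil => simp [pvFindEmptyA] at h
  | cons f rest ih =>
    by_cases hf : pvIsEmptyFrameA f
    · simp [pvFindEmptyA, hf] at h
      simp [List.length_cons]
      omega
    · simp [pvFindEmptyA, hf] at h
      obtain ⟨j, hj, rfl⟩ := h
      have := ih hj
      simp [List.length_cons]
      omega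

def split_video_on_empty_frame_py (video : List (List (List (String × Option Int)))) : List (List (List (List (String × Option Int)))) :=
  if video.length = 0 then []
  else
    match hfe : pvFindEmptyA video with
    | none => [video]
    | some idx =>
      if idx = 0 then split_video_on_empty_frame_py (PySem.List.slice video (some 1) none)
      else if idx = video.length - 1 then [PySem.List.slice video none (some (idx : Int))]
      else split_video_on_empty_frame_py (PySem.List.slice video none (some (idx : Int))) ++
           split_video_on_empty_frame_py (PySem.List.slice video (some ((idx : Int) + 1)) none)
  termination_by video.length
  decreasing_by
  · rw [PySem.List.slice_from_one]
    simp only [List.length_tail]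
    omega
  · have := pvFindEmptyA_lt hfe
    simp only [PySem.List.slice_to_natCast]
    simp; omega
  · have := pvFindEmptyA_lt hfe
    have h1 : ((idx : Int) + 1) = ((idx + 1 : Nat) : Int) := by push_cast; ring
    rw [h1, PySem.List.slice_from_natCast]
    simp; omega

-- ===== PORT B =====
def pvIsEmptyFrameB (f : List (List (String × Option Int))) : Bool :=
  match PySem.List.pyGet? f 0 with
  | some d => d.all (fun p => p.2 == (none : Option Int))
  | none => true

-- one pass: state = (runs so far, current run); flush the current run at an empty frame and at the end
def split_video_on_empty_frame_py_alt (video : List (List (List (String × Option Int)))) : List (List (List (List (String × Option Int)))) :=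
  let st := video.foldl
    (fun (st : List (List (List (List (String × Option Int)))) × List (List (List (String × Option Int)))) frame =>
      if pvIsEmptyFrameB frame then
        (if st.2 ≠ [] then st.1 ++ [st.2] else st.1, [])
      else (st.1, st.2 ++ [frame]))
    ([], [])
  if st.2 ≠ [] then st.1 ++ [st.2] else st.1

-- ===== PRECONDITION & SPEC =====
-- Pre_ excludes exactly the inputs containing an empty frame list, on which Python A's
-- `frame[0]` raises IndexError.
def Pre_split_video_on_empty_frame_py (video : List (List (List (String × Option Int)))) : Prop :=
  ∀ f ∈ video, f ≠ []
instance (video : List (List (List (String × Option Int)))) : Decidable (Pre_split_video_on_empty_frame_py video) := by unfold Pre_split_video_on_empty_frame_py; infer_instance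

def pvWitness_split_video_on_empty_frame_py : (List (List (List (String × Option Int)))) :=
  [[[("a", some 1)]], [[("a", none)]], [[("b", some 2)]]]

def Spec_split_video_on_empty_frame_py (video : List (List (List (String × Option Int)))) (out : List (List (List (List (String × Option Int))))) : Prop := out = split_video_on_empty_frame_py_alt video
instance (video : List (List (List (String × Option Int)))) (out : List (List (List (List (String × Option Int))))) : Decidable (Spec_split_video_on_empty_frame_py video out) := by unfold Spec_split_video_on_empty_frame_py; infer_instance

-- ===== CLAIM (what is proved, stated in full; the proofs are below) =====
def Claim_equal_split_video_on_empty_frame_py : Prop := ∀ (video : List (List (List (String × Option Int)))), Dom_split_video_on_empty_frame_py video → Pre_split_video_on_empty_frame_py video → Spec_split_video_on_empty_frame_py video (split_video_on_empty_frame_py video)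

-- ===== LEMMAS AND PROOFS =====

-- named copies of B's fold step and final flush, for the loop invariant
def pvStep (st : List (List (List (List (String × Option Int)))) × List (List (List (String × Option Int))))
    (frame : List (List (String × Option Int))) :
    List (List (List (List (String × Option Int)))) × List (List (List (String × Option Int))) :=
  if pvIsEmptyFrameB frame then
    (if st.2 ≠ [] then st.1 ++ [st.2] else st.1, [])
  else (st.1, st.2 ++ [frame])

def pvFinish (st : List (List (List (List (String × Option Int)))) × List (List (List (String × Option Int)))) :
    List (List (List (List (String × Option Int)))) :=
  if st.2 ≠ [] then st.1 ++ [st.2] else st.1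

-- canonical recursive form of B's grouping: pvG cur l = runs produced from pending run `cur` and rest `l`
def pvG (cur : List (List (List (String × Option Int)))) (l : List (List (List (String × Option Int)))) : List (List (List (List (String × Option Int)))) :=
  match l with
  | [] => if cur = [] then [] else [cur]
  | f :: rest =>
    if pvIsEmptyFrameB f then (if cur = [] then [] else [cur]) ++ pvG [] rest
    else pvG (cur ++ [f]) rest

theorem pvB_foldl (l : List (List (List (String × Option Int))))
    (runs : List (List (List (List (String × Option Int)))))
    (cur : List (List (List (String × Option Int)))) :
    pvFinish (l.foldl pvStep (runs, cur)) = runs ++ pvG cur l := by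
  induction l generalizing runs cur with
  | nil =>
    simp only [List.foldl_nil, pvFinish, pvG]
    by_cases h : cur = [] <;> simp [h]
  | cons f rest ih =>
    simp only [List.foldl_cons, pvG]
    by_cases hf : pvIsEmptyFrameB f
    · rw [show pvStep (runs, cur) f = (if cur ≠ [] then runs ++ [cur] else runs, []) from by
        simp [pvStep, hf]]
      rw [ih]
      simp only [hf]
      by_cases h : cur = [] <;> simp [h]
    · rw [show pvStep (runs, cur) f = (runs, cur ++ [f]) from by simp [pvStep, hf]]
      rw [ih, if_neg hf]

theorem pvB_eq_G (video : List (List (List (String × Option Int)))) :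
    split_video_on_empty_frame_py_alt video = pvG [] video := by
  have h : split_video_on_empty_frame_py_alt video = pvFinish (video.foldl pvStep ([], [])) := rfl
  rw [h, pvB_foldl]
  simp

theorem pvFindEmptyA_none (l : List (List (List (String × Option Int))))
    (h : ∀ f ∈ l, pvIsEmptyFrameA f = false) : pvFindEmptyA l = none := by
  induction l with
  | nil => simp [pvFindEmptyA]
  | cons f rest ih =>
    have hf := h f (by simp)
    simp [pvFindEmptyA, hf, ih (fun g hg => h g (by simp [hg]))]

theorem pvFindEmptyA_none_all (l : List (List (List (String × Option Int))))
    (h : pvFindEmptyA l = none) : ∀ f ∈ l, pvIsEmptyFrameA f = false := by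
  induction l with
  | nil => simp
  | cons f rest ih =>
    by_cases hf : pvIsEmptyFrameA f
    · simp [pvFindEmptyA, hf] at h
    · simp only [pvFindEmptyA, if_neg hf, Option.map_eq_none_iff] at h
      intro g hg
      rw [List.mem_cons] at hg
      rcases hg with rfl | hg
      · simpa using hf
      · exact ih h g hg

theorem pvFindEmptyA_some {l : List (List (List (String × Option Int)))} {i : Nat}
    (h : pvFindEmptyA l = some i) :
    ∃ pre e suf, l = pre ++ e :: suf ∧ pre.length = i ∧
      (∀ f ∈ pre, pvIsEmptyFrameA f = false) ∧ pvIsEmptyFrameA e = true := by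
  induction l generalizing i with
  | nil => simp [pvFindEmptyA] at h
  | cons f rest ih =>
    by_cases hf : pvIsEmptyFrameA f
    · simp [pvFindEmptyA, hf] at h
      exact ⟨[], f, rest, by simp, by simp [List.length_nil]; omega, by simp, hf⟩
    · simp only [pvFindEmptyA, if_neg hf, Option.map_eq_some_iff] at h
      obtain ⟨j, hj, rfl⟩ := h
      obtain ⟨pre, e, suf, rfl, hlen, hpre, he⟩ := ih hj
      refine ⟨f :: pre, e, suf, by simp, by simp [hlen], ?_, he⟩
      intro g hg
      rw [List.mem_cons] at hg
      rcases hg with rfl | hg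
      · simpa using hf
      · exact hpre g hg

theorem pvG_all_nonempty (l : List (List (List (String × Option Int))))
    (h : ∀ f ∈ l, pvIsEmptyFrameB f = false) (cur : List (List (List (String × Option Int)))) :
    pvG cur l = if cur ++ l = [] then [] else [cur ++ l] := by
  induction l generalizing cur with
  | nil => simp [pvG]
  | cons f rest ih =>
    have hf := h f (by simp)
    rw [pvG, if_neg (by simp [hf]), ih (fun g hg => h g (by simp [hg]))]
    simp

theorem pvG_split (pre : List (List (List (String × Option Int))))
    (e : List (List (String × Option Int))) (suf : List (List (List (String × Option Int))))
    (hpre : ∀ f ∈ pre, pvIsEmptyFrameB f = false) (he : pvIsEmptyFrameB e = true)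
    (cur : List (List (List (String × Option Int)))) :
    pvG cur (pre ++ e :: suf) = (if cur ++ pre = [] then [] else [cur ++ pre]) ++ pvG [] suf := by
  induction pre generalizing cur with
  | nil => simp [pvG, he]
  | cons f pre' ih =>
    have hf := hpre f (by simp)
    rw [List.cons_append, pvG, if_neg (by simp [hf]),
        ih (fun g hg => hpre g (by simp [hg]))]
    simp

-- the two ports' emptiness predicates are the same function
theorem pvIsEmpty_eq (f : List (List (String × Option Int))) :
    pvIsEmptyFrameB f = pvIsEmptyFrameA f := rfl

-- A on a nonempty list with no empty frame returns the single run
theorem pvA_no_empty (l : List (List (List (String × Option Int))))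
    (hne : l ≠ []) (h : ∀ f ∈ l, pvIsEmptyFrameA f = false) :
    split_video_on_empty_frame_py l = [l] := by
  rw [split_video_on_empty_frame_py]
  rw [if_neg (by simpa [List.length_eq_zero_iff] using hne)]
  split
  · rfl
  · rename_i idx hfe
    rw [pvFindEmptyA_none l h] at hfe
    exact absurd hfe (by simp)

theorem pvA_eq_G : ∀ (n : Nat) (video : List (List (List (String × Option Int)))),
    video.length ≤ n → split_video_on_empty_frame_py video = pvG [] video := by
  intro n
  induction n with
  | zero =>
    intro video hlen
    have hv : video = [] := List.eq_nil_of_length_eq_zero (by omega)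
    subst hv
    rw [split_video_on_empty_frame_py]
    simp [pvG]
  | succ n ih =>
    intro video hlen
    by_cases hz : video.length = 0
    · have hv : video = [] := List.eq_nil_of_length_eq_zero hz
      subst hv
      rw [split_video_on_empty_frame_py]
      simp [pvG]
    rw [split_video_on_empty_frame_py, if_neg hz]
    split
    · rename_i hfe
      rw [pvG_all_nonempty video (fun f hf => (pvIsEmpty_eq f).trans (pvFindEmptyA_none_all video hfe f hf))]
      have hne : video ≠ [] := by intro h; exact hz (by simp [h])
      simp [hne]
    · rename_i idx hfe
      obtain ⟨pre, e, suf, hv, hlenpre, hpre, he⟩ := pvFindEmptyA_some hfe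
      subst hv
      have hlen2 : pre.length + 1 + suf.length ≤ n + 1 := by
        simp at hlen
        omega
      rw [pvG_split pre e suf (fun f hf => (pvIsEmpty_eq f).trans (hpre f hf))
          ((pvIsEmpty_eq e).trans he) []]
      by_cases h0 : idx = 0
      · have hpre0 : pre = [] := List.eq_nil_of_length_eq_zero (by omega)
        subst hpre0
        rw [if_pos h0]
        rw [show PySem.List.slice ([] ++ e :: suf) (some 1) none = suf from by
          rw [PySem.List.slice_from_one]; simp]
        rw [ih suf (by simp at hlen2; omega)]
        simp
      · have hprene : pre ≠ [] := by
          intro h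
          apply h0
          rw [h] at hlenpre
          simpa using hlenpre.symm
        rw [if_neg h0]
        have hsto : PySem.List.slice (pre ++ e :: suf) none (some (idx : Int)) = pre := by
          rw [PySem.List.slice_to_natCast, ← hlenpre, List.take_left]
        by_cases hlast : idx = (pre ++ e :: suf).length - 1
        · have hsuf : suf = [] := by
            simp at hlast
            have : pre.length = idx := hlenpre
            rw [List.eq_nil_iff_length_eq_zero]
            omega
          subst hsuf
          rw [if_pos hlast, hsto]
          simp [pvG, hprene]
        · rw [if_neg hlast, hsto]
          rw [show PySem.List.slice (pre ++ e :: suf) (some ((idx : Int) + 1)) none = suf from by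
            rw [show ((idx : Int) + 1) = ((idx + 1 : Nat) : Int) from by push_cast; ring,
                PySem.List.slice_from_natCast, ← hlenpre,
                show pre ++ e :: suf = (pre ++ [e]) ++ suf from by simp,
                show pre.length + 1 = (pre ++ [e]).length from by simp,
                List.drop_left]]
          rw [pvA_no_empty pre hprene hpre, ih suf (by omega)]
          simp [hprene]

-- ===== VERDICT (by name: the statement is the Claim_ definition above) =====
theorem split_video_on_empty_frame_py_spec : Claim_equal_split_video_on_empty_frame_py := by
  intro video _ _
  unfold Spec_split_video_on_empty_frame_py
  rw [pvB_eq_G, pvA_eq_G video.length video (le_refl _)]
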